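-- pv_equiv track=rewrite | github.com/HIStateHealth/MetaAMR_Tracker | docker_files/Docker_AMR_abundance_programs_for_genes_and_DB_all_programs/calculate_abundance_bins_genus1.py | extract_genus_species
-- ===== SOURCE A (Python) =====
-- def extract_genus_species(taxonomic_string):
--     parts = taxonomic_string.split(';')
--     genus = None
--     species = None
--     for part in parts:
--         if part.startswith('g__'):
--             genus = part.split('__')[1]
--         elif part.startswith('s__'):
--             species = part.split('__')[1]
--     return f"{genus} {species}".strip()
-- ===== SOURCE B (Python) =====
-- def extract_genus_species(taxonomic_string):
--     def last_rank_value(prefix):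
--         # last occurrence wins: scan the parts back-to-front, stop at first hit
--         for part in reversed(taxonomic_string.split(';')):
--             if part.startswith(prefix):
--                 return part.split('__')[1]
--         return None
--     return f"{last_rank_value('g__')} {last_rank_value('s__')}".strip()
-- ===== Notes on version B (the rewrite author's own statement) =====
-- stated objective: alternative
-- what changed: Replaces the forward loop that mutates two accumulators (last assignment wins) with two independent back-to-front scans, each an early-returning helper that stops at the first matching rank from the end; no mutable state is kept.
import Mathlib
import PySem

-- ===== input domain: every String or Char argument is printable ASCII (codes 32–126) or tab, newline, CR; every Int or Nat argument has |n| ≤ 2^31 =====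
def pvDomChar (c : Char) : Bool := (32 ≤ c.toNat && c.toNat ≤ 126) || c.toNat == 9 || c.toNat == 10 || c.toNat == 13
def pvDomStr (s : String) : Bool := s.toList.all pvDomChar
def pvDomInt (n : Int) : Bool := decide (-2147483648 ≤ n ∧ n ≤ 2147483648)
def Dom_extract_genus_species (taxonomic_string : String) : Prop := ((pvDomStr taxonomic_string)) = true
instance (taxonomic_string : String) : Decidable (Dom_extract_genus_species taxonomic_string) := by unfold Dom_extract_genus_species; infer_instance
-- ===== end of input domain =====

-- ===== PORT A =====
-- B replaces the forward loop mutating two accumulators with two independent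
-- back-to-front scans that stop at the first matching rank (objective: alternative);
-- return values proved equal on all of Dom.

-- Python f-string formatting of a possibly-None string: None prints as "None"
def pyFmtOpt (o : Option String) : String :=
  match o with
  | none => "None"
  | some s => s

-- one loop iteration of A: update (genus, species) according to the part's prefix
-- (the split always has a second piece in a fired branch, so the getD "" default is unreachable)
def pvStepA (st : Option String × Option String) (part : String) : Option String × Option String :=
  if PySem.Str.startswith part "g__" then
    (some ((PySem.List.pyGet? ((PySem.Str.split? part "__").getD []) 1).getD ""), st.2)
  else if PySem.Str.startswith part "s__" then
    (st.1, some ((PySem.List.pyGet? ((PySem.Str.split? part "__").getD []) 1).getD ""))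
  else st

def extract_genus_species (taxonomic_string : String) : String :=
  -- parts = taxonomic_string.split(';')  (sep ";" is nonempty, split? is always some)
  let parts := (PySem.Str.split? taxonomic_string ";").getD []
  let st := parts.foldl pvStepA (none, none)
  PySem.Str.strip (PySem.Str.join " " [pyFmtOpt st.1, pyFmtOpt st.2])

-- ===== PORT B =====
-- B's helper last_rank_value: scan the reversed parts list, early-return at the first
-- part starting with the prefix (the split always has a second piece there, so getD "" is unreachable)
def pvLastRank (pref : String) : List String → Option String
  | [] => none
  | p :: rest =>
    if PySem.Str.startswith p pref then
      some ((PySem.List.pyGet? ((PySem.Str.split? p "__").getD []) 1).getD "")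
    else pvLastRank pref rest

def extract_genus_species_alt (taxonomic_string : String) : String :=
  let parts := (PySem.Str.split? taxonomic_string ";").getD []
  PySem.Str.strip (PySem.Str.join " "
    [pyFmtOpt (pvLastRank "g__" parts.reverse), pyFmtOpt (pvLastRank "s__" parts.reverse)])

-- ===== PRECONDITION & SPEC =====
def Spec_extract_genus_species (taxonomic_string : String) (out : String) : Prop := out = extract_genus_species_alt taxonomic_string
instance (taxonomic_string : String) (out : String) : Decidable (Spec_extract_genus_species taxonomic_string out) := by unfold Spec_extract_genus_species; infer_instance

-- ===== CLAIM (what is proved, stated in full; the proofs are below) =====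
def Claim_equal_extract_genus_species : Prop := ∀ (taxonomic_string : String), Dom_extract_genus_species taxonomic_string → Spec_extract_genus_species taxonomic_string (extract_genus_species taxonomic_string)

-- ===== LEMMAS AND PROOFS =====

-- first match in l ++ [p]: a match in l wins, otherwise p is checked
theorem pvLastRank_append (pref : String) (l : List String) (p : String) :
    pvLastRank pref (l ++ [p])
      = ((pvLastRank pref l).elim (pvLastRank pref [p]) some) := by
  induction l with
  | nil => simp [pvLastRank]
  | cons q rest ih =>
    simp only [List.cons_append, pvLastRank]
    split <;> (try simp [ih, pvLastRank]) <;> rfl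

-- a part cannot start with both "g__" and "s__"
theorem pv_not_both (p : String) (hg : PySem.Chars.startswith p.toList ['g','_','_'] = true) :
    PySem.Chars.startswith p.toList ['s','_','_'] = false := by
  by_contra h
  rw [Bool.not_eq_false] at h
  have h1 := (PySem.Chars.startswith_iff p.toList ['g','_','_']).mp hg
  have h2 := (PySem.Chars.startswith_iff p.toList ['s','_','_']).mp h
  cases hl : p.toList with
  | nil => rw [hl] at h1; simp at h1
  | cons c t =>
    rw [hl, List.cons_prefix_cons] at h1 h2
    rw [← h1.1] at h2
    exact absurd h2.1 (by decide)

-- A's fold equals B's reverse scans (last assignment wins = first match from the end)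
theorem pvFold_eq (parts : List String) (g s : Option String) :
    parts.foldl pvStepA (g, s)
      = ((pvLastRank "g__" parts.reverse).elim g some,
         (pvLastRank "s__" parts.reverse).elim s some) := by
  induction parts generalizing g s with
  | nil => simp [pvLastRank]
  | cons p rest ih =>
    simp only [List.foldl_cons, List.reverse_cons, pvLastRank_append]
    rw [ih]
    unfold pvStepA
    by_cases hg : PySem.Chars.startswith p.toList ['g','_','_'] = true
    · have hs := pv_not_both p hg
      cases pvLastRank "g__" rest.reverse <;> cases pvLastRank "s__" rest.reverse <;>
        simp [pvLastRank, hg, hs]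
    · by_cases hs : PySem.Chars.startswith p.toList ['s','_','_'] = true
      · cases pvLastRank "g__" rest.reverse <;> cases pvLastRank "s__" rest.reverse <;>
          simp [pvLastRank, hg, hs]
      · cases pvLastRank "g__" rest.reverse <;> cases pvLastRank "s__" rest.reverse <;>
          simp [pvLastRank, hg, hs]

-- ===== VERDICT (by name: the statement is the Claim_ definition above) =====
theorem extract_genus_species_spec : Claim_equal_extract_genus_species := by
  intro t _
  unfold Spec_extract_genus_species
  simp only [extract_genus_species, extract_genus_species_alt, pvFold_eq]
  cases pvLastRank "g__" ((PySem.Str.split? t ";").getD []).reverse <;>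
    cases pvLastRank "s__" ((PySem.Str.split? t ";").getD []).reverse <;> rfl
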